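-- pv_equiv track=rewrite | github.com/MMannuru/CS1301 | HW06.PY | stayInSchool
-- ===== SOURCE A (Python) =====
-- def stayInSchool(people, networth, gender):
--     schoolDict = {}
--
--     for i in range(len(people)):
--         student = people[i]
--         net_worth = networth[i]
--         gen_var = gender[i]
--
--         if net_worth >= 1:
--             if gen_var == "boy":
--                 school = 'St. Jude'
--             elif gen_var == "girl":
--                 school = 'Constance Billard'
--             else:
--                 continue
--
--             if school not in schoolDict:
--                 schoolDict[school] = []
--
--             schoolDict[school].append(student)
--
--     for school, students in schoolDict.items():
--         students.sort()
--
--     return schoolDict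
-- ===== SOURCE B (Python) =====
-- def _school(g):
--     if g == 'boy':
--         return 'St. Jude'
--     if g == 'girl':
--         return 'Constance Billard'
--     return None
--
-- def stayInSchool(people, networth, gender):
--     schools = []
--     for i in range(len(people)):
--         s = _school(gender[i])
--         if s is not None and networth[i] >= 1 and s not in schools:
--             schools.append(s)
--     return {s: sorted(people[i] for i in range(len(people))
--                       if _school(gender[i]) == s and networth[i] >= 1)
--             for s in schools}
-- ===== Notes on version B (the rewrite author's own statement) =====
-- stated objective: alternative
-- what changed: B first computes the school key order in one pass, then builds the dict as a comprehension with one sorted() of a filtered pass per school, instead of A's incremental bucket-appending dict followed by an in-place sort of every bucket.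
import Mathlib
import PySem

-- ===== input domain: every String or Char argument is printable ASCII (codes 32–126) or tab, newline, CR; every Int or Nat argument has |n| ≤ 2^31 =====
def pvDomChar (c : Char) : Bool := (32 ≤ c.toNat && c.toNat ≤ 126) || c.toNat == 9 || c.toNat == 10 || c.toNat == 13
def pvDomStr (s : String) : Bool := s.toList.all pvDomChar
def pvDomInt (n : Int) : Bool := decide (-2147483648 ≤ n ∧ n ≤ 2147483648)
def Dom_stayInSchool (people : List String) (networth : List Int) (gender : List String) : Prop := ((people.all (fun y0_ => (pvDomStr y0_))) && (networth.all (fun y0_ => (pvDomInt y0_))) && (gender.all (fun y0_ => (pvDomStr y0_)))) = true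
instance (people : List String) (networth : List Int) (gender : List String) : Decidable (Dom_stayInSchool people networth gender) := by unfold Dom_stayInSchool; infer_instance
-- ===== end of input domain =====

-- B computes the dict's key order in one first pass, then builds each school's roster as one
-- sorted, filtered pass — a different decomposition from A's incremental bucket dict with a
-- per-bucket in-place sort (same return value; alternative, no speed claim).


-- ===== PORT A =====
-- A's shared tail block: "if school not in schoolDict: schoolDict[school] = []; schoolDict[school].append(student)"
def pvAddStudent (d : PySem.Dict String (List String)) (school student : String) :
    PySem.Dict String (List String) :=
  let d1 := if d.contains school then d else d.insert school []
  d1.insert school (d1.getD school [] ++ [student])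

-- pyGetD is exact under Pre_stayInSchool (every index of range(len(people)) is in range)
def stayInSchool (people : List String) (networth : List Int) (gender : List String) :
    List (String × List String) :=
  let d := (PySem.List.pyRange 0 (people.length : Int) 1).foldl
    (fun d i =>
      let student := PySem.List.pyGetD people i ""
      let net_worth := PySem.List.pyGetD networth i 0
      let gen_var := PySem.List.pyGetD gender i ""
      if 1 ≤ net_worth then
        if gen_var = "boy" then pvAddStudent d "St. Jude" student
        else if gen_var = "girl" then pvAddStudent d "Constance Billard" student
        else d
      else d)
    PySem.Dict.empty
  d.items.map (fun p => (p.1, PySem.List.sorted p.2 (fun x => x) false))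

-- ===== PORT B =====
-- Source B's helper _school(g)
def pvSchoolOf (g : String) : Option String :=
  if g = "boy" then some "St. Jude"
  else if g = "girl" then some "Constance Billard"
  else none

def stayInSchool_alt (people : List String) (networth : List Int) (gender : List String) :
    List (String × List String) :=
  let idxs := PySem.List.pyRange 0 (people.length : Int) 1
  let schools := idxs.foldl
    (fun ord i =>
      match pvSchoolOf (PySem.List.pyGetD gender i "") with
      | some s => if 1 ≤ PySem.List.pyGetD networth i 0 ∧ s ∉ ord then ord ++ [s] else ord
      | none => ord) []
  schools.map (fun s =>
    (s, PySem.List.sorted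
        ((idxs.filter (fun i =>
            pvSchoolOf (PySem.List.pyGetD gender i "") == some s
              && decide (1 ≤ PySem.List.pyGetD networth i 0))).map
          (fun i => PySem.List.pyGetD people i ""))
        (fun x => x) false))

-- ===== PRECONDITION & SPEC =====
-- Pre_ excludes exactly the inputs where A raises IndexError: networth or gender shorter than people.
def Pre_stayInSchool (people : List String) (networth : List Int) (gender : List String) : Prop :=
  people.length ≤ networth.length ∧ people.length ≤ gender.length
instance (people : List String) (networth : List Int) (gender : List String) : Decidable (Pre_stayInSchool people networth gender) := by unfold Pre_stayInSchool; infer_instance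
def pvWitness_stayInSchool : List String × List Int × List String :=
  (["ann", "bob"], [2, 1], ["girl", "boy"])

def Spec_stayInSchool (people : List String) (networth : List Int) (gender : List String) (out : List (String × List String)) : Prop := out = stayInSchool_alt people networth gender
instance (people : List String) (networth : List Int) (gender : List String) (out : List (String × List String)) : Decidable (Spec_stayInSchool people networth gender out) := by unfold Spec_stayInSchool; infer_instance

-- ===== CLAIM (what is proved, stated in full; the proofs are below) =====
def Claim_equal_stayInSchool : Prop := ∀ (people : List String) (networth : List Int) (gender : List String), Dom_stayInSchool people networth gender → Pre_stayInSchool people networth gender → Spec_stayInSchool people networth gender (stayInSchool people networth gender)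

-- ===== LEMMAS AND PROOFS =====

-- proof-side classifier: the (school, student) pair index i contributes, if any
def pvClassify (people : List String) (networth : List Int) (gender : List String) (i : Int) :
    Option (String × String) :=
  match pvSchoolOf (PySem.List.pyGetD gender i "") with
  | some s =>
      if 1 ≤ PySem.List.pyGetD networth i 0 then some (s, PySem.List.pyGetD people i "") else none
  | none => none

lemma pv_foldl_filterMap {α β γ : Type} (f : α → Option β) (g : γ → β → γ) (l : List α)
    (init : γ) :
    l.foldl (fun acc a => (f a).elim acc (g acc)) init = (l.filterMap f).foldl g init := by
  induction l generalizing init with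
  | nil => rfl
  | cons a l ih =>
      simp only [List.foldl_cons, List.filterMap_cons]
      cases f a <;> simp [ih]

lemma pv_foldl_congr {α β : Type} (f g : β → α → β) (l : List α) (init : β)
    (h : ∀ b a, a ∈ l → f b a = g b a) : l.foldl f init = l.foldl g init := by
  induction l generalizing init with
  | nil => rfl
  | cons a l ih =>
      rw [List.foldl_cons, List.foldl_cons, h _ _ (by simp)]
      exact ih _ (fun b a ha => h b a (by simp [ha]))

lemma pvAddStudent_eq_modify (d : PySem.Dict String (List String)) (s v : String) :
    pvAddStudent d s v = d.modify s [] (fun x => x ++ [v]) := by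
  unfold pvAddStudent PySem.Dict.modify
  by_cases h : d.contains s = true
  · simp [h]
  · have h' : d.contains s = false := by simpa using h
    simp only [h', Bool.false_eq_true, if_false]
    have hD : (d.insert s []).getD s [] = [] := PySem.Dict.getD_insert_self d s [] []
    rw [hD, PySem.Dict.getD_of_not_contains d [] h']
    have hkeys : ∀ p ∈ d.items, (p.1 == s) = false := by
      intro p hp
      apply beq_eq_false_iff_ne.mpr
      intro hps
      have hc : d.contains p.1 = true :=
        (PySem.Dict.contains_iff_mem_keys d p.1).mpr (PySem.Dict.mem_keys_of_mem_items d hp)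
      rw [hps, h'] at hc
      exact Bool.false_ne_true hc
    apply PySem.Dict.ext
    rw [PySem.Dict.items_insert_of_contains _ _ (PySem.Dict.contains_insert_self d s []),
        PySem.Dict.items_insert_of_not_contains d [] h',
        PySem.Dict.items_insert_of_not_contains d _ h',
        List.map_append]
    have hmap : List.map (fun p => if p.1 = s then (s, [v]) else p) d.items = d.items := by
      have := List.map_congr_left (l := d.items)
        (f := fun p => if p.1 = s then (s, [v]) else p) (g := id)
        (fun p hp => by
          have hne := hkeys p hp
          rw [beq_eq_false_iff_ne] at hne
          simp [hne])
      simpa using this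
    simp [hmap]

-- B's filtered pass over the indices is the classified pairs restricted to one school
lemma pv_bucket_eq (people : List String) (networth : List Int) (gender : List String)
    (L : List Int) (s : String) :
    (L.filter (fun i =>
        pvSchoolOf (PySem.List.pyGetD gender i "") == some s
          && decide (1 ≤ PySem.List.pyGetD networth i 0))).map
      (fun i => PySem.List.pyGetD people i "")
    = ((L.filterMap (pvClassify people networth gender)).filter
        (fun p => p.1 == s)).map (fun p => p.2) := by
  induction L with
  | nil => rfl
  | cons i L ih =>
      rw [List.filter_cons, List.filterMap_cons]
      cases h : pvSchoolOf (PySem.List.pyGetD gender i "") with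
      | none =>
          have hc : pvClassify people networth gender i = none := by simp [pvClassify, h]
          simpa [hc, h] using ih
      | some t =>
          by_cases hn : 1 ≤ PySem.List.pyGetD networth i 0
          · have hc : pvClassify people networth gender i
                = some (t, PySem.List.pyGetD people i "") := by
              simp [pvClassify, h, hn]
            by_cases hts : t = s
            · simp [hc, hn, hts, ih]
            · simp [hc, hn, hts, ih]
          · have hc : pvClassify people networth gender i = none := by simp [pvClassify, h, hn]
            simpa [hc, h, hn] using ih

lemma pv_items_eq_keys_map (d : PySem.Dict String (List String)) (h : d.keys.Nodup) :
    d.items = d.keys.map (fun k => (k, d.getD k [])) := by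
  have : d.keys.map (fun k => (k, d.getD k [])) = d.items.map (fun p => (p.1, d.getD p.1 [])) := by
    simp only [PySem.Dict.keys, List.map_map]; rfl
  rw [this, List.map_congr_left (g := id), List.map_id]
  intro p hp
  have := PySem.Dict.getD_of_mem_items d (k := p.1) (v := p.2) (by simpa using hp) h []
  simp [this]

-- ===== VERDICT (by name: the statement is the Claim_ definition above) =====
theorem stayInSchool_spec : Claim_equal_stayInSchool := by
  intro people networth gender _ _
  unfold Spec_stayInSchool stayInSchool stayInSchool_alt
  set idxs := PySem.List.pyRange 0 (people.length : Int) 1 with hidxs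
  set pairs := idxs.filterMap (pvClassify people networth gender) with hpairs
  -- A's dict is the modify-fold over the classified pairs
  have hA : (idxs.foldl
      (fun d i =>
        let student := PySem.List.pyGetD people i ""
        let net_worth := PySem.List.pyGetD networth i 0
        let gen_var := PySem.List.pyGetD gender i ""
        if 1 ≤ net_worth then
          if gen_var = "boy" then pvAddStudent d "St. Jude" student
          else if gen_var = "girl" then pvAddStudent d "Constance Billard" student
          else d
        else d)
      PySem.Dict.empty)
      = pairs.foldl (fun d p => d.modify p.1 [] (fun x => x ++ [p.2])) PySem.Dict.empty := by
    rw [hpairs, ← pv_foldl_filterMap]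
    refine pv_foldl_congr _ _ idxs _ (fun d i _ => ?_)
    show (if 1 ≤ PySem.List.pyGetD networth i 0 then _ else _) = _
    by_cases hn : 1 ≤ PySem.List.pyGetD networth i 0 <;>
      by_cases hb : PySem.List.pyGetD gender i "" = "boy" <;>
        by_cases hg : PySem.List.pyGetD gender i "" = "girl" <;>
          simp [pvClassify, pvSchoolOf, hn, hb, hg, pvAddStudent_eq_modify]
  -- B's first pass collects the schools of the classified pairs in first-insertion order
  have hB : (idxs.foldl
      (fun ord i =>
        match pvSchoolOf (PySem.List.pyGetD gender i "") with
        | some s => if 1 ≤ PySem.List.pyGetD networth i 0 ∧ s ∉ ord then ord ++ [s] else ord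
        | none => ord) [])
      = PySem.Set.ofList (pairs.map (fun p => p.1)) := by
    have h1 : (idxs.foldl
        (fun ord i =>
          match pvSchoolOf (PySem.List.pyGetD gender i "") with
          | some s => if 1 ≤ PySem.List.pyGetD networth i 0 ∧ s ∉ ord then ord ++ [s] else ord
          | none => ord) [])
        = idxs.foldl
            (fun ord i => (pvClassify people networth gender i).elim ord
              (fun p => PySem.Set.add ord p.1)) [] := by
      refine pv_foldl_congr _ _ idxs _ (fun ord i _ => ?_)
      cases h : pvSchoolOf (PySem.List.pyGetD gender i "") with
      | none => simp [pvClassify, h]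
      | some s =>
          by_cases hn : 1 ≤ PySem.List.pyGetD networth i 0
          · by_cases hm : s ∈ ord <;>
              simp [pvClassify, h, hn, hm, PySem.Set.add_eq_ite]
          · simp [pvClassify, h, hn]
    rw [h1, pv_foldl_filterMap, ← hpairs, ← PySem.Set.update_map_eq_foldl_add,
        PySem.Set.update_nil_left]
  simp only [hA, hB]
  -- characterise the items of A's modify-fold
  set D := pairs.foldl (fun d p => d.modify p.1 [] (fun x => x ++ [p.2])) PySem.Dict.empty with hD
  have hnodup : D.keys.Nodup := by
    rw [hD]
    exact PySem.Dict.nodup_keys_foldl_modify_key pairs (fun p => p.1) []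
      (fun _ p => fun x => x ++ [p.2]) PySem.Dict.empty (by simp [PySem.Dict.keys_empty])
  have hkeys : D.keys = PySem.Set.ofList (pairs.map (fun p => p.1)) := by
    rw [hD, PySem.Dict.keys_foldl_modify_key pairs (fun p => p.1) []
      (fun _ p => fun x => x ++ [p.2]) PySem.Dict.empty]
    rw [PySem.Dict.keys_empty, PySem.Set.update_nil_left]
  have hgetD : ∀ s, D.getD s [] = (pairs.filter (fun p => p.1 == s)).map (fun p => p.2) := by
    intro s
    rw [hD, PySem.Dict.getD_foldl_modify_append pairs PySem.Dict.empty s]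
    simp [PySem.Dict.getD_empty]
  rw [pv_items_eq_keys_map D hnodup, hkeys, List.map_map]
  apply List.map_congr_left
  intro s _
  simp only [Function.comp_apply, hgetD s, pv_bucket_eq people networth gender idxs s, hpairs]
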